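-- pv_equiv track=rewrite | github.com/Frod90/coding-test-python | programmers/P42627.py | solution
-- ===== SOURCE A (Python) =====
-- import heapq
--
-- def solution(jobs):
--     jobs.sort()
--
--     heap = []
--     time = 0
--     i = 0
--     total = 0
--
--     while i < len(jobs) or heap:
--         while i < len(jobs) and jobs[i][0] <= time:
--             request, work = jobs[i]
--             heapq.heappush(heap, (work, request))
--             i += 1
--
--         if heap:
--             work, request = heapq.heappop(heap)
--             time += work
--             total += time - request
--         else:
--             time = jobs[i][0]
--
--     return total // len(jobs)
-- ===== SOURCE B (Python) =====
-- def solution(jobs):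
--     jobs.sort()
--     pending = [(j[0], j[1]) for j in jobs]
--     pool = []
--     time = 0
--     total = 0
--     while pending or pool:
--         while pending and pending[0][0] <= time:
--             pool.append(pending.pop(0))
--         if pool:
--             request, work = min(pool, key=lambda jb: (jb[1], jb[0]))
--             pool.remove((request, work))
--             time += work
--             total += time - request
--         else:
--             time = pending[0][0]
--     return total // len(jobs)
-- ===== Notes on version B (the rewrite author's own statement) =====
-- stated objective: simpler
-- what changed: B drops heapq entirely: the available jobs sit in a plain pool list from which each step picks min(pool, key=(work, request)) by a linear scan and removes it, with the sorted job list consumed from the front as a queue instead of tracked by an index; same event-driven SJF result, no priority-queue machinery.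
import Mathlib
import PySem

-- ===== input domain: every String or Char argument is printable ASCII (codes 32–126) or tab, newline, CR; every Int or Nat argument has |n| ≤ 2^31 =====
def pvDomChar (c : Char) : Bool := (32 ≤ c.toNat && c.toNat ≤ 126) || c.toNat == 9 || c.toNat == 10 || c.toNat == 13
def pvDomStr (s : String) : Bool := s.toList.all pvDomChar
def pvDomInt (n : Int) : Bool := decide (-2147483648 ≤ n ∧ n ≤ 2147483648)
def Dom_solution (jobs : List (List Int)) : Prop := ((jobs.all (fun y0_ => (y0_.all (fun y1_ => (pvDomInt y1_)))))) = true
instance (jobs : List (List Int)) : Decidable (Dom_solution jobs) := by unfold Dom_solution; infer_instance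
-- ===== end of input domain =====

-- B replaces A's heapq priority queue by a plain pool list scanned for its minimum each step (objective: simpler
-- event loop, no heap). Both A and B sort `jobs` in place; the theorems below are about the return value only
-- (the in-place sort is performed identically by both Pythons).

-- ===== PORT A =====
-- Python's `jobs.sort()` on lists of ints: lexicographic comparison = Lean's `<` on `List Int`.
-- `heapq` is modelled observationally: the heap is kept as a plain list (push = append), and `heappop` is
-- "return the minimum, remove it" (`min2?` + `erase`) — exact, because the only behaviour of heapq visible to A
-- is that `heappop` returns a smallest element, and elements with equal (work, request) are identical tuples.
-- `request, work = jobs[i]` is ported as the two reads `j[0]`, `j[1]` — exact when `jobs[i]` has length 2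
-- (Pre_solution; Python raises ValueError otherwise).

-- the inner `while i < len(jobs) and jobs[i][0] <= time:` push loop; `i` stays a Nat (it starts at 0 and only grows)
def pushA (js : List (List Int)) (time : Int) (i : Nat) (heap : List (Int × Int)) : Nat × List (Int × Int) :=
  if hi : i < js.length then
    if PySem.List.pyGetD js[i] 0 0 ≤ time then
      pushA js time (i + 1) (heap ++ [(PySem.List.pyGetD js[i] 1 0, PySem.List.pyGetD js[i] 0 0)])
    else (i, heap)
  else (i, heap)
termination_by js.length - i
decreasing_by omega

-- the outer `while i < len(jobs) or heap:` loop; fuel bounds the iteration count (≤ 2·len+1: each iteration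
-- pops one job or jumps the clock, and no two jumps are consecutive) — a totality guard, not an algorithm change
def loopA (js : List (List Int)) : Nat → Nat → List (Int × Int) → Int → Int → Int
  | 0, _, _, _, total => total
  | fuel + 1, i, heap, time, total =>
    if i < js.length ∨ heap ≠ [] then
      match pushA js time i heap with
      | (i', heap') =>
        match PySem.List.min2? heap' (fun p => p.1) (fun p => p.2) with
        | some m => loopA js fuel i' (heap'.erase m) (time + m.1) (total + (time + m.1 - m.2))
        | none => loopA js fuel i' heap' (PySem.List.pyGetD (PySem.List.pyGetD js (i' : Int) []) 0 0) total
    else total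

def solution (jobs : List (List Int)) : Int :=
  let js := PySem.List.sorted jobs (fun x => x) false
  PySem.Int.floordiv (loopA js (2 * js.length + 2) 0 [] 0 0) (js.length : Int)

-- ===== PORT B =====
-- helper for B's comprehension `[(j[0], j[1]) for j in jobs]`
def pvPair (j : List Int) : Int × Int := (PySem.List.pyGetD j 0 0, PySem.List.pyGetD j 1 0)

-- `while pending and pending[0][0] <= time: pool.append(pending.pop(0))`
def fillB (time : Int) : List (Int × Int) → List (Int × Int) → List (Int × Int) × List (Int × Int)
  | [], pool => ([], pool)
  | p :: rest, pool =>
    if p.1 ≤ time then fillB time rest (pool ++ [p]) else (p :: rest, pool)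

-- `while pending or pool:` — same totality fuel guard as loopA
def loopB : Nat → List (Int × Int) → List (Int × Int) → Int → Int → Int
  | 0, _, _, _, total => total
  | fuel + 1, pending, pool, time, total =>
    if pending ≠ [] ∨ pool ≠ [] then
      match fillB time pending pool with
      | (pending', pool') =>
        -- `min(pool, key=lambda jb: (jb[1], jb[0]))` then `pool.remove(...)`
        match PySem.List.min2? pool' (fun p => p.2) (fun p => p.1) with
        | some m =>
          match PySem.List.remove? pool' m with
          | some pool'' => loopB fuel pending' pool'' (time + m.2) (total + (time + m.2 - m.1))
          | none => total  -- unreachable: the minimum is a member of the pool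
        | none => loopB fuel pending' pool' (PySem.List.pyGetD pending' 0 (0, 0)).1 total
    else total

def solution_alt (jobs : List (List Int)) : Int :=
  let js := PySem.List.sorted jobs (fun x => x) false
  let pending := js.map pvPair
  PySem.Int.floordiv (loopB (2 * js.length + 2) pending [] 0 0) (js.length : Int)

-- ===== PRECONDITION & SPEC =====
-- Pre_ excludes exactly the inputs where the Python A raises: empty `jobs` (ZeroDivisionError in `total // len(jobs)`)
-- and any inner list whose length is not 2 (`request, work = jobs[i]` raises ValueError).
def Pre_solution (jobs : List (List Int)) : Prop := jobs ≠ [] ∧ ∀ j ∈ jobs, j.length = 2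
instance (jobs : List (List Int)) : Decidable (Pre_solution jobs) := by unfold Pre_solution; infer_instance

def pvWitness_solution : List (List Int) := [[0, 3], [1, 9], [2, 6]]

def Spec_solution (jobs : List (List Int)) (out : Int) : Prop := out = solution_alt jobs
instance (jobs : List (List Int)) (out : Int) : Decidable (Spec_solution jobs out) := by unfold Spec_solution; infer_instance

-- ===== CLAIM (what is proved, stated in full; the proofs are below) =====
def Claim_equal_solution : Prop := ∀ (jobs : List (List Int)), Dom_solution jobs → Pre_solution jobs → Spec_solution jobs (solution jobs)

-- ===== LEMMAS AND PROOFS =====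

-- lexicographic "≤" on the two projected keys: the order min2? minimises
def pvLexLe {α : Type} (k1 k2 : α → Int) (a b : α) : Prop :=
  k1 a < k1 b ∨ (k1 a = k1 b ∧ k2 a ≤ k2 b)

-- the fold step of PySem.List.min2?, named so it can be reasoned about
def pvStep {α : Type} (k1 k2 : α → Int) (acc : Option α) (x : α) : Option α :=
  match acc with
  | none => some x
  | some m =>
    if (decide (k1 x < k1 m) || !decide (k1 m < k1 x) && decide (k2 x < k2 m)) = true then some x else some m

theorem min2?_eq_foldl {α : Type} (k1 k2 : α → Int) (xs : List α) :
    PySem.List.min2? xs k1 k2 = List.foldl (pvStep k1 k2) none xs := rfl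

theorem pvStep_some {α : Type} (k1 k2 : α → Int) (a x : α) :
    pvStep k1 k2 (some a) x =
      if (decide (k1 x < k1 a) || !decide (k1 a < k1 x) && decide (k2 x < k2 a)) = true then some x
      else some a := rfl

theorem min2?_foldl_aux {α : Type} (k1 k2 : α → Int) :
    ∀ (xs : List α) (a m : α),
      List.foldl (pvStep k1 k2) (some a) xs = some m →
      (m = a ∨ m ∈ xs) ∧ pvLexLe k1 k2 m a ∧ ∀ y ∈ xs, pvLexLe k1 k2 m y := by
  intro xs
  induction xs with
  | nil =>
    intro a m h
    simp only [List.foldl_nil, Option.some.injEq] at h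
    subst h
    exact ⟨Or.inl rfl, Or.inr ⟨rfl, le_refl _⟩, by simp⟩
  | cons x xs ih =>
    intro a m h
    rw [List.foldl_cons, pvStep_some] at h
    by_cases hc : (decide (k1 x < k1 a) || !decide (k1 a < k1 x) && decide (k2 x < k2 a)) = true
    · rw [if_pos hc] at h
      obtain ⟨hm, hma, hall⟩ := ih x m h
      simp only [Bool.or_eq_true, Bool.and_eq_true, Bool.not_eq_true', decide_eq_true_eq,
        decide_eq_false_iff_not] at hc
      refine ⟨?_, ?_, ?_⟩
      · rcases hm with rfl | hm
        · exact Or.inr (List.mem_cons_self ..)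
        · exact Or.inr (List.mem_cons_of_mem _ hm)
      · unfold pvLexLe at hma ⊢; omega
      · intro y hy
        rcases List.mem_cons.mp hy with rfl | hy
        · exact hma
        · exact hall y hy
    · rw [if_neg hc] at h
      obtain ⟨hm, hma, hall⟩ := ih a m h
      simp only [Bool.or_eq_true, Bool.and_eq_true, Bool.not_eq_true', decide_eq_true_eq,
        decide_eq_false_iff_not] at hc
      refine ⟨?_, hma, ?_⟩
      · rcases hm with rfl | hm
        · exact Or.inl rfl
        · exact Or.inr (List.mem_cons_of_mem _ hm)
      · intro y hy
        rcases List.mem_cons.mp hy with rfl | hy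
        · unfold pvLexLe at hma ⊢; omega
        · exact hall y hy

theorem min2?_int_spec {α : Type} (k1 k2 : α → Int) (xs : List α) (m : α)
    (h : PySem.List.min2? xs k1 k2 = some m) :
    m ∈ xs ∧ ∀ y ∈ xs, pvLexLe k1 k2 m y := by
  cases xs with
  | nil => simp [min2?_eq_foldl] at h
  | cons x t =>
    rw [min2?_eq_foldl, List.foldl_cons] at h
    obtain ⟨hm, hmx, hall⟩ := min2?_foldl_aux k1 k2 t x m h
    refine ⟨?_, ?_⟩
    · rcases hm with rfl | hm
      · exact List.mem_cons_self ..
      · exact List.mem_cons_of_mem _ hm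
    · intro y hy
      rcases List.mem_cons.mp hy with rfl | hy
      · exact hmx
      · exact hall y hy

theorem foldl_pvStep_isSome {α : Type} (k1 k2 : α → Int) :
    ∀ (t : List α) (a : α), ∃ m, List.foldl (pvStep k1 k2) (some a) t = some m := by
  intro t
  induction t with
  | nil => exact fun a => ⟨a, rfl⟩
  | cons x t ih =>
    intro a
    rw [List.foldl_cons, pvStep_some]
    by_cases hc : (decide (k1 x < k1 a) || !decide (k1 a < k1 x) && decide (k2 x < k2 a)) = true
    · rw [if_pos hc]; exact ih x
    · rw [if_neg hc]; exact ih a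

theorem min2?_isSome {α : Type} (k1 k2 : α → Int) (xs : List α) (hne : xs ≠ []) :
    ∃ m, PySem.List.min2? xs k1 k2 = some m := by
  cases xs with
  | nil => exact absurd rfl hne
  | cons x t =>
    rw [min2?_eq_foldl, List.foldl_cons]
    exact foldl_pvStep_isSome k1 k2 t x

-- the minimum value of A's heap is the swap of the minimum that B's pool scan finds
theorem min_corr (heap pool : List (Int × Int)) (hperm : heap.Perm (pool.map Prod.swap))
    (m : Int × Int) (h : PySem.List.min2? pool (fun p => p.2) (fun p => p.1) = some m) :
    PySem.List.min2? heap (fun p => p.1) (fun p => p.2) = some (m.2, m.1) := by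
  obtain ⟨hmem, hmin⟩ := min2?_int_spec _ _ _ _ h
  have hswap : (m.2, m.1) ∈ heap := hperm.mem_iff.mpr (List.mem_map.mpr ⟨m, hmem, rfl⟩)
  have hne : heap ≠ [] := by
    intro e; rw [e] at hswap; exact absurd hswap (List.not_mem_nil)
  obtain ⟨m', hm'⟩ := min2?_isSome (fun p => p.1) (fun p => p.2) heap hne
  obtain ⟨hmem', hmin'⟩ := min2?_int_spec _ _ _ _ hm'
  obtain ⟨p, hp, hpe⟩ := List.mem_map.mp (hperm.mem_iff.mp hmem')
  have h1 := hmin' (m.2, m.1) hswap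
  have h2 := hmin p hp
  have he : m' = (m.2, m.1) := by
    subst hpe
    obtain ⟨p1, p2⟩ := p
    obtain ⟨m1, m2⟩ := m
    unfold pvLexLe at h1 h2
    simp only [Prod.swap_prod_mk, Prod.mk.injEq] at h1 h2 ⊢
    omega
  rw [hm', he]

theorem push_corr (js : List (List Int)) (time : Int) :
    ∀ (i : Nat) (heap pool : List (Int × Int)), heap.Perm (pool.map Prod.swap) →
      (pushA js time i heap).2.Perm ((fillB time ((js.drop i).map pvPair) pool).2.map Prod.swap)
      ∧ (fillB time ((js.drop i).map pvPair) pool).1 = (js.drop (pushA js time i heap).1).map pvPair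
      ∧ ((pushA js time i heap).2 = [] → (pushA js time i heap).1 = i ∧ heap = []) := by
  intro i heap
  fun_induction pushA js time i heap with
  | case1 i heap hi hle ih =>
    intro pool hperm
    have hdrop : js.drop i = js[i] :: js.drop (i + 1) := List.drop_eq_getElem_cons hi
    have hfill : fillB time ((js.drop i).map pvPair) pool
        = fillB time ((js.drop (i + 1)).map pvPair) (pool ++ [pvPair js[i]]) := by
      rw [hdrop, List.map_cons, fillB, if_pos (show (pvPair js[i]).1 ≤ time from hle)]
    have hperm' : (heap ++ [(PySem.List.pyGetD js[i] 1 0, PySem.List.pyGetD js[i] 0 0)]).Perm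
        ((pool ++ [pvPair js[i]]).map Prod.swap) := by
      rw [List.map_append]
      exact hperm.append (List.Perm.refl _)
    obtain ⟨c1, c2, c3⟩ := ih (pool ++ [pvPair js[i]]) hperm'
    rw [hfill]
    refine ⟨c1, c2, fun he => ?_⟩
    obtain ⟨-, habs⟩ := c3 he
    simp at habs
  | case2 i heap hi hle =>
    intro pool hperm
    have hdrop : js.drop i = js[i] :: js.drop (i + 1) := List.drop_eq_getElem_cons hi
    have hfill : fillB time ((js.drop i).map pvPair) pool
        = ((js.drop i).map pvPair, pool) := by
      rw [hdrop, List.map_cons, fillB, if_neg (show ¬ (pvPair js[i]).1 ≤ time from hle), ← List.map_cons, ← hdrop]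
    rw [hfill]
    exact ⟨hperm, rfl, fun he => ⟨rfl, he⟩⟩
  | case3 i heap hi =>
    intro pool hperm
    have hdrop : js.drop i = [] := List.drop_eq_nil_iff.mpr (by omega)
    rw [hdrop]
    exact ⟨hperm, by simp [fillB], fun he => ⟨rfl, he⟩⟩

theorem loop_corr (js : List (List Int)) :
    ∀ (fuel : Nat) (i : Nat) (heap pool : List (Int × Int)) (time total : Int),
      heap.Perm (pool.map Prod.swap) →
      loopA js fuel i heap time total = loopB fuel ((js.drop i).map pvPair) pool time total := by
  intro fuel
  induction fuel with
  | zero => intro i heap pool time total _; rfl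
  | succ fuel ih =>
    intro i heap pool time total hperm
    have hlen : heap.length = pool.length := by simpa using hperm.length_eq
    have hcond : (i < js.length ∨ heap ≠ []) ↔ ((js.drop i).map pvPair ≠ [] ∨ pool ≠ []) := by
      have h1 : ((js.drop i).map pvPair ≠ []) ↔ i < js.length := by
        simp [List.drop_eq_nil_iff]
      have h2 : (heap = []) ↔ (pool = []) := by
        rw [← List.length_eq_zero_iff, ← List.length_eq_zero_iff, hlen]
      rw [h1]
      exact or_congr Iff.rfl (not_congr h2)
    rw [loopA, loopB]
    by_cases hc : i < js.length ∨ heap ≠ []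
    · rw [if_pos hc, if_pos (hcond.mp hc)]
      obtain ⟨c1, c2, c3⟩ := push_corr js time i heap pool hperm
      rcases hpa : pushA js time i heap with ⟨i', heap'⟩
      rcases hfb : fillB time ((js.drop i).map pvPair) pool with ⟨pend', pool'⟩
      rw [hpa] at c1 c2 c3
      rw [hfb] at c1 c2
      dsimp only at c1 c2 c3 ⊢
      cases hmin : PySem.List.min2? pool' (fun p => p.2) (fun p => p.1) with
      | none =>
        have hpool : pool' = [] := by
          by_contra hne
          obtain ⟨mm, hmm⟩ := min2?_isSome _ _ pool' hne
          rw [hmm] at hmin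
          simp at hmin
        have hheap : heap' = [] := by
          rw [hpool] at c1
          simpa using c1
        obtain ⟨hii, hhe⟩ := c3 hheap
        have hi : i < js.length := by
          rcases hc with hi | hne
          · exact hi
          · exact absurd hhe hne
        have hminA : PySem.List.min2? heap' (fun p : Int × Int => p.1) (fun p => p.2) = none := by
          rw [hheap]; rfl
        rw [hminA, hpool]
        have hdropi : js.drop i = js[i] :: js.drop (i + 1) := List.drop_eq_getElem_cons hi
        have hpend : pend' = pvPair js[i] :: (js.drop (i + 1)).map pvPair := by
          rw [c2, hii, hdropi, List.map_cons]
        have hA : PySem.List.pyGetD js ((i' : Nat) : Int) [] = js[i] := by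
          rw [hii]
          simp [List.getD_eq_getElem?_getD, List.getElem?_eq_getElem hi]
        have hB : (PySem.List.pyGetD pend' 0 ((0 : Int), (0 : Int))).1 = PySem.List.pyGetD js[i] 0 0 := by
          rw [hpend, PySem.List.pyGetD_zero_cons, pvPair]
        rw [hA, hB, c2, hheap]
        exact ih i' [] [] (PySem.List.pyGetD js[i] 0 0) total (by simp)
      | some m =>
        rw [min_corr heap' pool' c1 m hmin]
        dsimp only
        rw [PySem.List.remove?_eq_some_erase pool' m (min2?_int_spec _ _ _ _ hmin).1]
        dsimp only
        have hperm' : (heap'.erase (m.2, m.1)).Perm ((pool'.erase m).map Prod.swap) := by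
          rw [List.map_erase Prod.swap_injective]
          exact c1.erase _
        rw [c2]
        exact ih _ _ _ _ _ hperm'
    · rw [if_neg hc, if_neg (fun h => hc (hcond.mpr h))]

-- ===== VERDICT (by name: the statement is the Claim_ definition above) =====
theorem solution_spec : Claim_equal_solution := by
  intro jobs _ _
  unfold Spec_solution solution solution_alt
  have h := loop_corr (PySem.List.sorted jobs (fun x => x) false) (2 * (PySem.List.sorted jobs (fun x => x) false).length + 2)
    0 [] [] 0 0 (by simp)
  simp only [List.drop_zero] at h
  exact congrArg (fun t => PySem.Int.floordiv t ((PySem.List.sorted jobs (fun x => x) false).length : Int)) h
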